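-- pv_equiv track=rewrite | github.com/sidkid78/mcp_servers | mcp-servers/smart-dev-env/src/prompts/architecture_analysis.py | _analyze_component_responsibilities
-- ===== SOURCE A (Python) =====
-- from typing import Dict, List
--
-- def _analyze_component_responsibilities(files: List[str]) -> List[str]:
--     """Analyze component responsibilities."""
--
--     responsibility_patterns = {
--         "Data Management": ["model", "schema", "database"],
--         "User Interface": [".html", ".css", ".jsx", "component"],
--         "Business Logic": ["service", "business", "logic"],
--         "API": ["api", "route", "endpoint"],
--         "Configuration": ["config", ".env"],
--         "Testing": ["test", "spec"]
--     }
--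
--     responsibilities = []
--     for responsibility, patterns in responsibility_patterns.items():
--         if any(any(pattern in file.lower() for pattern in patterns) for file in files):
--             responsibilities.append(responsibility)
--
--     return responsibilities
-- ===== SOURCE B (Python) =====
-- from typing import Dict, List
--
-- def _analyze_component_responsibilities(files: List[str]) -> List[str]:
--     """Analyze component responsibilities."""
--     # Category names in the original dict order; index = bit position.
--     CATEGORIES = ["Data Management", "User Interface", "Business Logic",
--                   "API", "Configuration", "Testing"]
--     # Flattened (pattern, bit) pairs.
--     FLAT = [("model", 0), ("schema", 0), ("database", 0),
--             (".html", 1), (".css", 1), (".jsx", 1), ("component", 1),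
--             ("service", 2), ("business", 2), ("logic", 2),
--             ("api", 3), ("route", 3), ("endpoint", 3),
--             ("config", 4), (".env", 4),
--             ("test", 5), ("spec", 5)]
--     # One pass over the files OR-ing per-pattern bits into an integer mask,
--     # then decode the mask into category names.
--     mask = 0
--     for f in files:
--         low = f.lower()
--         for pat, bit in FLAT:
--             if pat in low:
--                 mask |= 1 << bit
--     return [name for i, name in enumerate(CATEGORIES) if mask >> i & 1]
-- ===== Notes on version B (the rewrite author's own statement) =====
-- stated objective: faster
-- what changed: B replaces A's per-category list scans with a bitmask algorithm: each filename is lowercased once and scanned once against a flattened (pattern, bit) table, matches are OR-ed into one integer mask, and the result is decoded from the mask's bits over an indexed category array.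
import Mathlib
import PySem

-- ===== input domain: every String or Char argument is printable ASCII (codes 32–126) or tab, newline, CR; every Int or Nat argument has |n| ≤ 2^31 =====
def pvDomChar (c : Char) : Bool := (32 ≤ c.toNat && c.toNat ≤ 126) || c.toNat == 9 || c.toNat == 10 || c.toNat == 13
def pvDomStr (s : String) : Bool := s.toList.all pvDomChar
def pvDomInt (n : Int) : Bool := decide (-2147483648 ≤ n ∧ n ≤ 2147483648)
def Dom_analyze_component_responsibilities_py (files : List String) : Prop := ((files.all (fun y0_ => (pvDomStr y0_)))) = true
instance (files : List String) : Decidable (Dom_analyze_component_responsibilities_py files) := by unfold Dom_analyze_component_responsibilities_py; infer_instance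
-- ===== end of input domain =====

-- B replaces A's per-category list scans with a bitmask algorithm: one pass over the files OR-ing
-- bits of a flat (pattern, bit) table into one integer mask, then decoding the mask (alternative).

-- ===== PORT A =====
-- A's dict literal, in insertion order
def pvPatterns : List (String × List String) :=
  [("Data Management", ["model", "schema", "database"]),
   ("User Interface", [".html", ".css", ".jsx", "component"]),
   ("Business Logic", ["service", "business", "logic"]),
   ("API", ["api", "route", "endpoint"]),
   ("Configuration", ["config", ".env"]),
   ("Testing", ["test", "spec"])]

-- for each category in dict order, scan all files for any pattern hit
def analyze_component_responsibilities_py (files : List String) : List String :=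
  pvPatterns.foldl (fun acc kp =>
    if files.any (fun file => kp.2.any (fun pattern => PySem.Str.isIn pattern (PySem.Str.lower file)))
    then acc ++ [kp.1] else acc) []

-- ===== PORT B =====
-- B's CATEGORIES array (index = bit position) and flattened (pattern, bit) table
def pvCategories : List String :=
  ["Data Management", "User Interface", "Business Logic", "API", "Configuration", "Testing"]

def pvFlat : List (String × Nat) :=
  [("model", 0), ("schema", 0), ("database", 0),
   (".html", 1), (".css", 1), (".jsx", 1), ("component", 1),
   ("service", 2), ("business", 2), ("logic", 2),
   ("api", 3), ("route", 3), ("endpoint", 3),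
   ("config", 4), (".env", 4),
   ("test", 5), ("spec", 5)]

-- per-file step: lowercase once, OR in the bit of every matching pattern
def pvMaskStep (mask : Nat) (f : String) : Nat :=
  let low := PySem.Str.lower f
  pvFlat.foldl (fun m pb => if PySem.Str.isIn pb.1 low then m ||| (1 <<< pb.2) else m) mask

-- decode `mask >> i & 1` over enumerate(CATEGORIES); the indices produced are 0..5, so .toNat is exact
def analyze_component_responsibilities_py_alt (files : List String) : List String :=
  let mask := files.foldl pvMaskStep 0
  ((PySem.List.enumerate pvCategories).filter
      (fun p => ((mask >>> p.1.toNat) &&& 1) == 1)).map Prod.snd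

-- ===== PRECONDITION & SPEC =====
def Spec_analyze_component_responsibilities_py (files : List String) (out : List String) : Prop := out = analyze_component_responsibilities_py_alt files
instance (files : List String) (out : List String) : Decidable (Spec_analyze_component_responsibilities_py files out) := by unfold Spec_analyze_component_responsibilities_py; infer_instance

-- ===== CLAIM (what is proved, stated in full; the proofs are below) =====
def Claim_equal_analyze_component_responsibilities_py : Prop := ∀ (files : List String), Dom_analyze_component_responsibilities_py files → Spec_analyze_component_responsibilities_py files (analyze_component_responsibilities_py files)

-- ===== LEMMAS AND PROOFS =====

-- `mask >> b & 1 == 1` is bit-testing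
lemma and_one_eq_testBit (m b : Nat) : (((m >>> b) &&& 1) == 1) = Nat.testBit m b := by
  simp [Nat.testBit, Nat.and_one_is_mod, Nat.one_and_eq_mod_two]

-- OR-ing in a single bit
lemma testBit_or_shift (m k b : Nat) :
    Nat.testBit (m ||| (1 <<< k)) b = (Nat.testBit m b || (k == b)) := by
  rw [Nat.testBit_or, Nat.shiftLeft_eq, one_mul, Nat.testBit_two_pow]
  by_cases h : k = b <;> simp [h]

-- bit b of the inner fold over an arbitrary (pattern, bit) table
lemma testBit_inner (L : List (String × Nat)) (q : String → Bool) (m b : Nat) :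
    Nat.testBit (L.foldl (fun m pb => if q pb.1 then m ||| (1 <<< pb.2) else m) m) b
      = (Nat.testBit m b || L.any (fun pb => q pb.1 && pb.2 == b)) := by
  induction L generalizing m with
  | nil => simp
  | cons pb L ih =>
    simp only [List.foldl_cons, List.any_cons, ih]
    by_cases h : q pb.1 = true
    · rw [h, if_pos rfl, testBit_or_shift]
      simp [Bool.or_assoc]
    · simp [h]

-- bit b of the whole mask: some file matches some pattern carrying bit b
lemma testBit_mask (files : List String) (m b : Nat) :
    Nat.testBit (files.foldl pvMaskStep m) b
      = (Nat.testBit m b ||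
         files.any (fun f => pvFlat.any (fun pb =>
           PySem.Str.isIn pb.1 (PySem.Str.lower f) && pb.2 == b))) := by
  induction files generalizing m with
  | nil => simp
  | cons f fs ih =>
    simp only [List.foldl_cons, List.any_cons, ih, pvMaskStep]
    rw [testBit_inner pvFlat (fun p => PySem.Str.isIn p (PySem.Str.lower f)) m b, Bool.or_assoc]

-- ===== VERDICT (by name: the statement is the Claim_ definition above) =====
theorem analyze_component_responsibilities_py_spec : Claim_equal_analyze_component_responsibilities_py := by
  intro files _
  show analyze_component_responsibilities_py files = analyze_component_responsibilities_py_alt files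
  -- bit b of the mask ↔ some file matches a pattern of bit b's category
  have hcat : ∀ (b : Nat) (ps : List String),
      (∀ f : String, pvFlat.any (fun pb => PySem.Str.isIn pb.1 (PySem.Str.lower f) && pb.2 == b)
        = ps.any (fun pattern => PySem.Str.isIn pattern (PySem.Str.lower f))) →
      Nat.testBit (files.foldl pvMaskStep 0) b
        = files.any (fun file => ps.any (fun pattern => PySem.Str.isIn pattern (PySem.Str.lower file))) := by
    intro b ps h
    rw [testBit_mask, Nat.zero_testBit, Bool.false_or]
    congr 1; funext f; exact h f
  have h0 := hcat 0 ["model", "schema", "database"] (by intro f; simp [pvFlat])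
  have h1 := hcat 1 [".html", ".css", ".jsx", "component"] (by intro f; simp [pvFlat])
  have h2 := hcat 2 ["service", "business", "logic"] (by intro f; simp [pvFlat])
  have h3 := hcat 3 ["api", "route", "endpoint"] (by intro f; simp [pvFlat])
  have h4 := hcat 4 ["config", ".env"] (by intro f; simp [pvFlat])
  have h5 := hcat 5 ["test", "spec"] (by intro f; simp [pvFlat])
  unfold analyze_component_responsibilities_py analyze_component_responsibilities_py_alt
  simp only [pvPatterns, List.foldl_cons, List.foldl_nil, List.nil_append]
  simp only [pvCategories, PySem.List.enumerate_cons, PySem.List.enumerate_nil,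
    Int.reduceAdd, Int.reduceToNat, List.filter_cons, List.filter_nil, and_one_eq_testBit]
  rw [← h0, ← h1, ← h2, ← h3, ← h4, ← h5]
  split_ifs <;> rfl
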